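-- pv_equiv track=rewrite | github.com/TimDiedrich/HFA-JOANA | real_data_analysis.py | keggOverlap
-- ===== SOURCE A (Python) =====
-- def keggOverlap(kegg:list)->list:
--     """
--     creates an overlap matrix of how many genes overlap between the kegg gene sets
--
--     Parameters
--     ----------
--     kegg : list
--         kegg gene - gene set assignment matrix.
--
--     Returns
--     -------
--     overlapMatrix : list
--         matrix of number of overlapping genes.
--
--     """
--     overlapMatrix = []
--     for t1 in kegg:
--         numOL = []
--         for t2 in kegg:
--             numGenes = 0
--             for entry in t1:
--                 if entry in t2:
--                     numGenes+=1
--             numOL.append(numGenes)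
--         overlapMatrix.append(numOL)
--     return overlapMatrix
-- ===== SOURCE B (Python) =====
-- def keggOverlap(kegg: list) -> list:
--     n = len(kegg)
--     index = {}
--     for j, t2 in enumerate(kegg):
--         for g in set(t2):
--             index.setdefault(g, []).append(j)
--     matrix = [[0] * n for _ in range(n)]
--     for i, t1 in enumerate(kegg):
--         row = matrix[i]
--         for g in t1:
--             for j in index.get(g, ()):
--                 row[j] += 1
--     return matrix
-- ===== Notes on version B (the rewrite author's own statement) =====
-- stated objective: faster
-- what changed: Replaces A's cubic triple loop (for each pair of sets, scan one set for each gene of the other) with an inverted gene-to-set-index built once from deduplicated sets, then fills each row by incrementing only the columns of sets that actually contain each gene.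
import Mathlib
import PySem

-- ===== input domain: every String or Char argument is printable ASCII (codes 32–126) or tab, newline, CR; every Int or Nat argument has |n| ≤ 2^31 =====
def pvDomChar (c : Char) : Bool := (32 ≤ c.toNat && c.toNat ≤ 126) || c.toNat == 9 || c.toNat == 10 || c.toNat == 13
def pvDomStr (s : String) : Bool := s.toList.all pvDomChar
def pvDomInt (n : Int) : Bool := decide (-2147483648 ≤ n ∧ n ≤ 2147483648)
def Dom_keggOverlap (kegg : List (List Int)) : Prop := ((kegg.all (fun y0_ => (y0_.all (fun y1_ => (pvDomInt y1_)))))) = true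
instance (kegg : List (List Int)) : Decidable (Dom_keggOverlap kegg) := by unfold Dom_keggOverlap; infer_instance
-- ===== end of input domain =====

-- B replaces A's three nested loops with an inverted gene->index map built once; rows are then
-- filled by walking only the sets that contain each gene (objective: faster; return value equal).


-- ===== PORT A =====
-- literal transliteration of A's three nested loops (accumulate-by-append)
def keggOverlap (kegg : List (List Int)) : List (List Int) :=
  kegg.foldl (fun overlapMatrix t1 =>
    overlapMatrix ++ [kegg.foldl (fun numOL t2 =>
      numOL ++ [t1.foldl (fun numGenes entry =>
        if entry ∈ t2 then numGenes + 1 else numGenes) 0]) []]) []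

-- ===== PORT B =====
-- 'for j, t2 in enumerate(kegg): for g in set(t2): index.setdefault(g, []).append(j)'
def koBuildIndex : List (List Int) → Nat → PySem.Dict Int (List Nat) → PySem.Dict Int (List Nat)
  | [], _, d => d
  | t2 :: rest, j, d =>
      koBuildIndex rest (j + 1)
        ((PySem.Set.ofList t2).foldl (fun d g => d.insert g (d.getD g [] ++ [j])) d)

-- row[j] += 1
def koBump (row : List Int) (j : Nat) : List Int := row.set j (row.getD j 0 + 1)

def keggOverlap_alt (kegg : List (List Int)) : List (List Int) :=
  let n := kegg.length
  let index := koBuildIndex kegg 0 PySem.Dict.empty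
  kegg.map (fun t1 =>
    t1.foldl (fun row g => (index.getD g []).foldl koBump row) (List.replicate n 0))

-- ===== PRECONDITION & SPEC =====
def Spec_keggOverlap (kegg : List (List Int)) (out : List (List Int)) : Prop := out = keggOverlap_alt kegg
instance (kegg : List (List Int)) (out : List (List Int)) : Decidable (Spec_keggOverlap kegg out) := by unfold Spec_keggOverlap; infer_instance

-- ===== CLAIM (what is proved, stated in full; the proofs are below) =====
def Claim_equal_keggOverlap : Prop := ∀ (kegg : List (List Int)), Dom_keggOverlap kegg → Spec_keggOverlap kegg (keggOverlap kegg)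

-- ===== LEMMAS AND PROOFS =====

-- the count A's innermost loop computes
def koCnt (t1 t2 : List Int) : Int :=
  t1.foldl (fun numGenes entry => if entry ∈ t2 then numGenes + 1 else numGenes) 0

lemma koCnt_eq_countP (t1 t2 : List Int) :
    koCnt t1 t2 = (t1.countP (fun e => decide (e ∈ t2)) : Int) := by
  have := PySem.List.foldl_count_if (fun e => decide (e ∈ t2)) t1 0
  simpa [koCnt] using this

lemma koCnt_cons (g : Int) (t1 t2 : List Int) :
    koCnt (g :: t1) t2 = koCnt t1 t2 + (if g ∈ t2 then 1 else 0) := by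
  simp [koCnt_eq_countP, List.countP_cons]

-- A's port is the matrix of counts
lemma keggOverlap_eq_map (kegg : List (List Int)) :
    keggOverlap kegg = kegg.map (fun t1 => kegg.map (fun t2 => koCnt t1 t2)) := by
  unfold keggOverlap
  simp only [PySem.List.foldl_append_singleton_eq_map, List.nil_append]
  rfl

-- the positions of the sets containing g, from j0 on
def koIdx : List (List Int) → Nat → Int → List Nat
  | [], _, _ => []
  | t :: rest, j0, g => (if g ∈ t then [j0] else []) ++ koIdx rest (j0 + 1) g

lemma getD_foldl_insert_of_not_mem (s : List Int) (g : Int) (j : Nat)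
    (d : PySem.Dict Int (List Nat)) (hg : g ∉ s) :
    (s.foldl (fun d g' => d.insert g' (d.getD g' [] ++ [j])) d).getD g [] = d.getD g [] := by
  induction s generalizing d with
  | nil => rfl
  | cons h rest ih =>
      simp only [List.foldl_cons]
      rw [ih _ (fun hm => hg (List.mem_cons_of_mem _ hm)),
        PySem.Dict.getD_insert_of_ne _ _ _ (fun he : g = h => hg (by rw [he]; exact List.mem_cons_self))]

lemma getD_foldl_insert (s : List Int) (g : Int) (j : Nat)
    (d : PySem.Dict Int (List Nat)) (hnd : s.Nodup) :
    (s.foldl (fun d g' => d.insert g' (d.getD g' [] ++ [j])) d).getD g []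
      = d.getD g [] ++ (if g ∈ s then [j] else []) := by
  induction s generalizing d with
  | nil => simp
  | cons h rest ih =>
      rcases List.nodup_cons.mp hnd with ⟨hh, hrest⟩
      simp only [List.foldl_cons]
      by_cases hg : g = h
      · subst hg
        rw [getD_foldl_insert_of_not_mem _ _ _ _ hh, PySem.Dict.getD_insert_self]
        simp
      · rw [ih _ hrest, PySem.Dict.getD_insert_of_ne _ _ _ hg]
        simp [List.mem_cons, hg]

lemma koBuildIndex_getD (ks : List (List Int)) (j0 : Nat)
    (d : PySem.Dict Int (List Nat)) (g : Int) :
    (koBuildIndex ks j0 d).getD g [] = d.getD g [] ++ koIdx ks j0 g := by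
  induction ks generalizing j0 d with
  | nil => simp [koBuildIndex, koIdx]
  | cons t rest ih =>
      rw [koBuildIndex, ih, getD_foldl_insert _ _ _ _ (PySem.Set.nodup_ofList t)]
      simp [koIdx, PySem.Set.mem_ofList, List.append_assoc]

lemma mem_koIdx (ks : List (List Int)) (j0 : Nat) (g : Int) (j : Nat) :
    j ∈ koIdx ks j0 g ↔ ∃ m : Nat, ∃ h : m < ks.length, j = j0 + m ∧ g ∈ ks[m] := by
  induction ks generalizing j0 with
  | nil => simp [koIdx]
  | cons t rest ih =>
      simp only [koIdx, List.mem_append, ih]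
      constructor
      · rintro (hj | ⟨m, hm, rfl, hg⟩)
        · refine ⟨0, by simp, ?_, ?_⟩
          · by_cases hg : g ∈ t
            · simp [hg] at hj
              omega
            · simp [hg] at hj
          · by_cases hg : g ∈ t <;> simp [hg] at hj ⊢
        · exact ⟨m + 1, by simpa using hm, by omega, by simpa using hg⟩
      · rintro ⟨m, hm, rfl, hg⟩
        cases m with
        | zero => exact Or.inl (by simpa using hg)
        | succ m' =>
            exact Or.inr ⟨m', by simpa using hm, by omega, by simpa using hg⟩

lemma koIdx_lb (ks : List (List Int)) (j0 : Nat) (g : Int) :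
    ∀ j ∈ koIdx ks j0 g, j0 ≤ j := by
  intro j hj
  rcases (mem_koIdx ks j0 g j).mp hj with ⟨m, _, rfl, _⟩
  omega

lemma koIdx_nodup (ks : List (List Int)) (j0 : Nat) (g : Int) : (koIdx ks j0 g).Nodup := by
  induction ks generalizing j0 with
  | nil => simp [koIdx]
  | cons t rest ih =>
      simp only [koIdx]
      by_cases hg : g ∈ t
      · simp only [hg, if_pos]
        refine List.Nodup.append (by simp) (ih _) ?_
        intro a ha hb
        have := koIdx_lb rest (j0 + 1) g a hb
        simp at ha; omega
      · simpa [hg] using ih _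

lemma koBump_fold (L : List Nat) (row : List Int) (hnd : L.Nodup)
    (hlt : ∀ j ∈ L, j < row.length) :
    (L.foldl koBump row).length = row.length ∧
    ∀ k, k < row.length →
      (L.foldl koBump row).getD k 0 = row.getD k 0 + (if k ∈ L then 1 else 0) := by
  induction L generalizing row with
  | nil => simp
  | cons j rest ih =>
      rcases List.nodup_cons.mp hnd with ⟨hj, hrest⟩
      have hjlt : j < row.length := hlt j List.mem_cons_self
      have hlen' : (koBump row j).length = row.length := by simp [koBump]
      have hlt' : ∀ i ∈ rest, i < (koBump row j).length := by
        intro i hi; rw [hlen']; exact hlt i (List.mem_cons_of_mem _ hi)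
      rcases ih (koBump row j) hrest hlt' with ⟨hlen, hval⟩
      refine ⟨by rw [List.foldl_cons, hlen, hlen'], ?_⟩
      intro k hk
      rw [List.foldl_cons, hval k (by omega)]
      have hset : (koBump row j).getD k 0
          = row.getD k 0 + (if k = j then 1 else 0) := by
        unfold koBump
        rw [List.getD_eq_getElem _ _ (by simpa using hk),
          List.getD_eq_getElem _ _ hk, List.getElem_set]
        by_cases hkj : j = k
        · subst hkj; rw [if_pos rfl, if_pos rfl, List.getD_eq_getElem _ _ hjlt]
        · rw [if_neg hkj, if_neg (fun h : k = j => hkj h.symm)]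
          simp
      rw [hset]
      by_cases hkj : k = j
      · subst hkj; simp [hj]
      · simp [List.mem_cons, hkj]

lemma rowFold_getD (kegg : List (List Int)) (t1 : List Int) :
    ∀ row : List Int, row.length = kegg.length →
      ((t1.foldl (fun row g =>
          ((koBuildIndex kegg 0 PySem.Dict.empty).getD g []).foldl koBump row) row).length
        = kegg.length ∧
      ∀ k (hk : k < kegg.length),
        (t1.foldl (fun row g =>
          ((koBuildIndex kegg 0 PySem.Dict.empty).getD g []).foldl koBump row) row).getD k 0
          = row.getD k 0 + koCnt t1 kegg[k]) := by
  induction t1 with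
  | nil => intro row hrow; simp [hrow, koCnt]
  | cons g t1 ih =>
      intro row hrow
      have hL : (koBuildIndex kegg 0 PySem.Dict.empty).getD g [] = koIdx kegg 0 g := by
        rw [koBuildIndex_getD]; simp
      have hnd : ((koBuildIndex kegg 0 PySem.Dict.empty).getD g []).Nodup := by
        rw [hL]; exact koIdx_nodup _ _ _
      have hbnd : ∀ j ∈ (koBuildIndex kegg 0 PySem.Dict.empty).getD g [], j < row.length := by
        intro j hj
        rw [hL] at hj
        rcases (mem_koIdx kegg 0 g j).mp hj with ⟨m, hm, rfl, _⟩
        omega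
      rcases koBump_fold _ row hnd hbnd with ⟨hlen1, hval1⟩
      rcases ih (((koBuildIndex kegg 0 PySem.Dict.empty).getD g []).foldl koBump row)
        (by rw [hlen1, hrow]) with ⟨hlen2, hval2⟩
      refine ⟨by simpa using hlen2, ?_⟩
      intro k hk
      rw [List.foldl_cons, hval2 k hk, hval1 k (by omega), koCnt_cons]
      have hmem : k ∈ (koBuildIndex kegg 0 PySem.Dict.empty).getD g [] ↔ g ∈ kegg[k] := by
        rw [hL, mem_koIdx]
        constructor
        · rintro ⟨m, hm, rfl, hg⟩; simpa using hg
        · intro hg; exact ⟨k, hk, by omega, hg⟩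
      by_cases hg : g ∈ kegg[k]
      · rw [if_pos (hmem.mpr hg), if_pos hg]; ring
      · rw [if_neg (fun h => hg (hmem.mp h)), if_neg hg]; ring

-- ===== VERDICT (by name: the statement is the Claim_ definition above) =====
theorem keggOverlap_spec : Claim_equal_keggOverlap := by
  intro kegg _
  unfold Spec_keggOverlap
  rw [keggOverlap_eq_map]
  simp only [keggOverlap_alt]
  apply List.map_congr_left
  intro t1 _
  rcases rowFold_getD kegg t1 (List.replicate kegg.length 0) (by simp) with ⟨hlen, hval⟩
  apply List.ext_getElem (by simp [hlen])
  intro k hk1 hk2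
  have hk : k < kegg.length := by simpa using hk1
  have h2 := hval k hk
  rw [List.getD_eq_getElem _ _ hk2] at h2
  rw [h2]
  simp
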